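-- pv_equiv track=rewrite | github.com/CodecoolKRK20173/erp-mvc-hania-szymon | model/crm/crm.py | get_longest_name_id
-- ===== SOURCE A (Python) =====
-- def get_longest_name_id(table):
--     """
--         Question: What is the id of the customer with the longest name?
--
--         Args:
--             table (list): data table to work on
--
--         Returns:
--             string: id of the longest name (if there are more than one, return
--                 the last by alphabetical order of the names)
--         """
--
--     name_list = []
--     max_characters_in_name = 0
--     longest_name = None
--     list_of_the_longest = []
--     sort_list = []
--     for line in table:
--         name_from_table = line[1]
--         name_list.append(name_from_table) #list of names
--     for name in name_list:
--         if len(name) > max_characters_in_name: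
--             max_characters_in_name = len(name) #Number of characters in longest name
--             longest_name = name #the longest name
--     for name in name_list:
--         if len (name) == len (longest_name):
--             list_of_the_longest.append(name) #the list of longest names
--     the_name_we_are_looking_for = max (list_of_the_longest)
--     for line in table:
--         if line[1] == the_name_we_are_looking_for:
--             return line[0]
-- ===== SOURCE B (Python) =====
-- def get_longest_name_id(table):
--     return max(table, key=lambda line: (len(line[1]), line[1]))[0]
-- ===== Notes on version B (the rewrite author's own statement) =====
-- stated objective: simpler
-- what changed: Replaces A's five-stage pipeline (collect names, scan for max length, filter longest, max of filtered, rescan for the row) with a single max over the rows keyed by (name length, name), which yields the same first row whose name is the alphabetically largest of the longest names.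
import Mathlib
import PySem

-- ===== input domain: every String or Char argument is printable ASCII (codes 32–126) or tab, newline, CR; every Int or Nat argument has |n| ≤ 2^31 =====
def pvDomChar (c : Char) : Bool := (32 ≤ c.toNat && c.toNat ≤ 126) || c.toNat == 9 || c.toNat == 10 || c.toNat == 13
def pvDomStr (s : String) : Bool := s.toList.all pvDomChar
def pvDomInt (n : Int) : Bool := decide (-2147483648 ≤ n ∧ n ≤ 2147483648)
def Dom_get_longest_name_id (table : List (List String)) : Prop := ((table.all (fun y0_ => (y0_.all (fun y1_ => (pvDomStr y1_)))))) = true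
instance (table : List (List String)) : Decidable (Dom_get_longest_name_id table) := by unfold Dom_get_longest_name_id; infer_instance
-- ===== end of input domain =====

-- B replaces A's five-pass pipeline with one max over rows keyed by (name length, name); equal return value on Pre_.

-- shared helper: line[1] (the name column); total stand-in, Pre_ guarantees the index is in range
def pvName (line : List String) : String := (PySem.List.pyGet? line 1).getD ""

-- ===== PORT A =====
-- the body of A's second loop
def pvStep2 (st : Int × Option String) (name : String) : Int × Option String :=
  if st.1 < PySem.Str.len name then (PySem.Str.len name, some name) else st

def get_longest_name_id (table : List (List String)) : String :=
  let name_list := table.map pvName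
  let r := name_list.foldl pvStep2 ((0 : Int), (none : Option String))
  let longest_name := r.2.getD ""          -- len(None) would raise in Python: excluded by Pre_
  let list_of_the_longest := name_list.filter
      (fun name => PySem.Str.len name == PySem.Str.len longest_name)
  let the_name := (PySem.List.max? list_of_the_longest (fun s => s)).getD ""   -- max([]) raises: Pre_ gives table ≠ []
  (table.findSome? (fun line =>
      if pvName line == the_name then some ((PySem.List.pyGet? line 0).getD "") else none)).getD ""

-- ===== PORT B =====
-- Python key (len(line[1]), line[1]) compared as a tuple = lexicographic order
def pvKey (line : List String) : Lex (Int × String) :=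
  toLex (PySem.Str.len (pvName line), pvName line)

def get_longest_name_id_alt (table : List (List String)) : String :=
  (PySem.List.pyGet? ((PySem.List.max? table pvKey).getD []) 0).getD ""

-- ===== PRECONDITION & SPEC =====
-- Pre_ excludes exactly the inputs where Python A raises: the empty table (max([]) → ValueError),
-- a row shorter than 2 (line[1] → IndexError), and tables whose names are all "" (len(None) → TypeError).
def Pre_get_longest_name_id (table : List (List String)) : Prop :=
  table ≠ [] ∧ (∀ line ∈ table, 2 ≤ line.length) ∧ (∃ line ∈ table, pvName line ≠ "")
instance (table : List (List String)) : Decidable (Pre_get_longest_name_id table) := by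
  unfold Pre_get_longest_name_id; infer_instance

def pvWitness_get_longest_name_id : List (List String) := [["1", "ab"], ["2", "xy"]]

def Spec_get_longest_name_id (table : List (List String)) (out : String) : Prop := out = get_longest_name_id_alt table
instance (table : List (List String)) (out : String) : Decidable (Spec_get_longest_name_id table out) := by unfold Spec_get_longest_name_id; infer_instance

-- ===== CLAIM (what is proved, stated in full; the proofs are below) =====
def Claim_equal_get_longest_name_id : Prop := ∀ (table : List (List String)), Dom_get_longest_name_id table → Pre_get_longest_name_id table → Spec_get_longest_name_id table (get_longest_name_id table)

-- ===== LEMMAS AND PROOFS =====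

-- the fold body of PySem.List.max?
def pvStep {α κ : Type} [LT κ] [DecidableLT κ] (k : α → κ) (acc : Option α) (x : α) : Option α :=
  match acc with
  | none => some x
  | some m => if k m < k x then some x else some m

theorem pvMax?_eq_foldl {α κ : Type} [LT κ] [DecidableLT κ] (xs : List α) (k : α → κ) :
    PySem.List.max? xs k = xs.foldl (pvStep k) none := rfl

theorem pvGo_ex {α κ : Type} [LT κ] [DecidableLT κ] (k : α → κ) :
    ∀ (xs : List α) (c : α), ∃ m, xs.foldl (pvStep k) (some c) = some m := by
  intro xs
  induction xs with
  | nil => intro c; exact ⟨c, rfl⟩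
  | cons x xs ih =>
    intro c
    rw [List.foldl_cons]
    show ∃ m, xs.foldl (pvStep k) (if k c < k x then some x else some c) = some m
    split
    · exact ih x
    · exact ih c

theorem pvGo_spec {α κ : Type} [LT κ] [DecidableLT κ] (k : α → κ)
    (hlt : ∀ {a b c : κ}, ¬ b < a → b < c → a < c)
    (htr : ∀ {a b c : κ}, a < b → b < c → a < c) :
    ∀ (xs : List α) (c m : α), xs.foldl (pvStep k) (some c) = some m →
      (m = c ∧ ∀ x ∈ xs, ¬ k c < k x) ∨
      (k c < k m ∧ ∃ as bs, xs = as ++ m :: bs ∧ (∀ a ∈ as, k a < k m) ∧ (∀ b ∈ bs, ¬ k m < k b)) := by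
  intro xs
  induction xs with
  | nil =>
    intro c m h
    simp only [List.foldl_nil, Option.some.injEq] at h
    exact Or.inl ⟨h.symm, by simp⟩
  | cons x xs ih =>
    intro c m h
    rw [List.foldl_cons] at h
    have hstep : pvStep k (some c) x = if k c < k x then some x else some c := rfl
    rw [hstep] at h
    by_cases hcx : k c < k x
    · rw [if_pos hcx] at h
      rcases ih x m h with ⟨rfl, hall⟩ | ⟨hxm, as, bs, rfl, has, hbs⟩
      · exact Or.inr ⟨hcx, [], xs, rfl, by simp, hall⟩
      · exact Or.inr ⟨htr hcx hxm, x :: as, bs, rfl, by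
          intro a ha
          rcases List.mem_cons.1 ha with rfl | ha
          · exact hxm
          · exact has a ha, hbs⟩
    · rw [if_neg hcx] at h
      rcases ih c m h with ⟨rfl, hall⟩ | ⟨hcm, as, bs, rfl, has, hbs⟩
      · refine Or.inl ⟨rfl, ?_⟩
        intro y hy
        rcases List.mem_cons.1 hy with rfl | hy
        · exact hcx
        · exact hall y hy
      · exact Or.inr ⟨hcm, x :: as, bs, rfl, by
          intro a ha
          rcases List.mem_cons.1 ha with rfl | ha
          · exact hlt hcx hcm
          · exact has a ha, hbs⟩

-- decomposition of max? on a nonempty list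
theorem pvMax?_decomp {α κ : Type} [LT κ] [DecidableLT κ] (k : α → κ)
    (hlt : ∀ {a b c : κ}, ¬ b < a → b < c → a < c)
    (htr : ∀ {a b c : κ}, a < b → b < c → a < c)
    (xs : List α) (hne : xs ≠ []) :
    ∃ m as bs, PySem.List.max? xs k = some m ∧ xs = as ++ m :: bs ∧
      (∀ a ∈ as, k a < k m) ∧ (∀ b ∈ bs, ¬ k m < k b) := by
  cases xs with
  | nil => exact absurd rfl hne
  | cons x xs =>
    obtain ⟨m, hm⟩ := pvGo_ex k xs x
    have hmax : PySem.List.max? (x :: xs) k = some m := by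
      rw [pvMax?_eq_foldl, List.foldl_cons]; exact hm
    rcases pvGo_spec k hlt htr xs x m hm with ⟨rfl, hall⟩ | ⟨hxm, as, bs, rfl, has, hbs⟩
    · exact ⟨m, [], xs, hmax, rfl, by simp, hall⟩
    · refine ⟨m, x :: as, bs, hmax, rfl, ?_, hbs⟩
      intro a ha
      rcases List.mem_cons.1 ha with rfl | ha
      · exact hxm
      · exact has a ha

-- A's second loop: result pairs a length with a witness of that length, dominates the inputs,
-- and its length is the initial one or attained by some element
theorem pvLoop2_spec : ∀ (ns : List String) (mc : Int) (lo : Option String),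
    PySem.Str.len (lo.getD "") = mc →
    PySem.Str.len ((ns.foldl pvStep2 (mc, lo)).2.getD "") = (ns.foldl pvStep2 (mc, lo)).1 ∧
    mc ≤ (ns.foldl pvStep2 (mc, lo)).1 ∧
    (∀ n ∈ ns, PySem.Str.len n ≤ (ns.foldl pvStep2 (mc, lo)).1) ∧
    ((ns.foldl pvStep2 (mc, lo)).1 = mc ∨ ∃ n ∈ ns, PySem.Str.len n = (ns.foldl pvStep2 (mc, lo)).1) := by
  intro ns
  induction ns with
  | nil => intro mc lo h; exact ⟨h, le_refl _, by simp, Or.inl rfl⟩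
  | cons n ns ih =>
    intro mc lo h
    rw [List.foldl_cons]
    by_cases hn : mc < PySem.Str.len n
    · have hstep : pvStep2 (mc, lo) n = (PySem.Str.len n, some n) := by
        simp only [pvStep2, if_pos hn]
      rw [hstep]
      obtain ⟨h1, h2, h3, h4⟩ := ih (PySem.Str.len n) (some n) rfl
      refine ⟨h1, le_trans (le_of_lt hn) h2, ?_, ?_⟩
      · intro y hy
        rcases List.mem_cons.1 hy with rfl | hy
        · exact h2
        · exact h3 y hy
      · rcases h4 with heq | ⟨y, hy, hly⟩
        · exact Or.inr ⟨n, List.mem_cons_self .., heq.symm⟩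
        · exact Or.inr ⟨y, List.mem_cons_of_mem _ hy, hly⟩
    · have hstep : pvStep2 (mc, lo) n = (mc, lo) := by simp only [pvStep2, if_neg hn]
      rw [hstep]
      obtain ⟨h1, h2, h3, h4⟩ := ih mc lo h
      refine ⟨h1, h2, ?_, ?_⟩
      · intro y hy
        rcases List.mem_cons.1 hy with rfl | hy
        · exact le_trans (le_of_not_gt hn) h2
        · exact h3 y hy
      · rcases h4 with heq | ⟨y, hy, hly⟩
        · exact Or.inl heq
        · exact Or.inr ⟨y, List.mem_cons_of_mem _ hy, hly⟩

-- skipping a prefix on which the scan produces nothing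
theorem pvFindSome_skip {α β : Type} (g : α → Option β) :
    ∀ (as : List α) (l : α) (bs : List α), (∀ a ∈ as, g a = none) →
      (as ++ l :: bs).findSome? g = (g l).orElse (fun _ => bs.findSome? g) := by
  intro as
  induction as with
  | nil => intro l bs _; rw [List.nil_append, List.findSome?_cons]; cases g l <;> simp [Option.orElse]
  | cons a as ih =>
    intro l bs h
    rw [List.cons_append, List.findSome?_cons, h a (List.mem_cons_self ..)]
    exact ih l bs (fun x hx => h x (List.mem_cons_of_mem _ hx))

-- ===== VERDICT (by name: the statement is the Claim_ definition above) =====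
theorem get_longest_name_id_spec : Claim_equal_get_longest_name_id := by
  intro table _ hpre
  obtain ⟨hne, -, -⟩ := hpre
  unfold Spec_get_longest_name_id
  -- decompose B's single max over the rows
  have hltK : ∀ {a b c : Lex (Int × String)}, ¬ b < a → b < c → a < c :=
    fun h1 h2 => lt_of_le_of_lt (not_lt.1 h1) h2
  obtain ⟨lB, as, bs, hB, htab, has, hbs⟩ :=
    pvMax?_decomp pvKey hltK (fun h1 h2 => lt_trans h1 h2) table hne
  have hBval : get_longest_name_id_alt table = (PySem.List.pyGet? lB 0).getD "" := by
    rw [get_longest_name_id_alt, hB]; rfl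
  -- every row's key is dominated by lB's key
  have hmaxall : ∀ l ∈ table, ¬ pvKey lB < pvKey l := by
    intro l hl
    rw [htab] at hl
    rcases List.mem_append.1 hl with hl | hl
    · exact lt_asymm (has l hl)
    · rcases List.mem_cons.1 hl with rfl | hl
      · exact lt_irrefl _
      · exact hbs l hl
  have hlen_le : ∀ l ∈ table, PySem.Str.len (pvName l) ≤ PySem.Str.len (pvName lB) := by
    intro l hl
    by_contra hgt
    exact hmaxall l hl (by
      show toLex _ < toLex _
      exact Prod.Lex.lt_iff.2 (Or.inl (lt_of_not_ge hgt)))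
  have hname_le : ∀ l ∈ table,
      PySem.Str.len (pvName l) = PySem.Str.len (pvName lB) → pvName l ≤ pvName lB := by
    intro l hl heq
    by_contra hgt
    exact hmaxall l hl (by
      show toLex _ < toLex _
      exact Prod.Lex.lt_iff.2 (Or.inr ⟨heq.symm, lt_of_not_ge hgt⟩))
  have hlBmem : lB ∈ table := by
    rw [htab]; exact List.mem_append_right _ (List.mem_cons_self ..)
  -- A's second loop
  obtain ⟨h1, -, h3, h4⟩ :=
    pvLoop2_spec (table.map pvName) 0 none (by simp [PySem.Str.len])
  have r1_eq : ((table.map pvName).foldl pvStep2 ((0 : Int), (none : Option String))).1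
      = PySem.Str.len (pvName lB) := by
    apply le_antisymm
    · rcases h4 with heq | ⟨n, hn, hln⟩
      · rw [heq]; simp [PySem.Str.len]
      · obtain ⟨l, hl, rfl⟩ := List.mem_map.1 hn
        exact hln ▸ hlen_le l hl
    · exact h3 _ (List.mem_map.2 ⟨lB, hlBmem, rfl⟩)
  have hlenM : PySem.Str.len
      (((table.map pvName).foldl pvStep2 ((0 : Int), (none : Option String))).2.getD "")
      = PySem.Str.len (pvName lB) := h1.trans r1_eq
  -- A's filtered list and its max
  have hA : get_longest_name_id table =
      (table.findSome? (fun line =>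
        if pvName line == (PySem.List.max? ((table.map pvName).filter
            (fun name => PySem.Str.len name == PySem.Str.len
              (((table.map pvName).foldl pvStep2 ((0 : Int), (none : Option String))).2.getD "")))
            (fun s => s)).getD ""
        then some ((PySem.List.pyGet? line 0).getD "") else none)).getD "" := rfl
  rw [hA, hlenM]
  have hMF : pvName lB ∈ (table.map pvName).filter
      (fun name => PySem.Str.len name == PySem.Str.len (pvName lB)) :=
    List.mem_filter.2 ⟨List.mem_map.2 ⟨lB, hlBmem, rfl⟩, by simp⟩
  obtain ⟨v, as2, bs2, hV, hF, hasv, hbsv⟩ :=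
    pvMax?_decomp (fun s => s) (fun h1 h2 => lt_of_le_of_lt (not_lt.1 h1) h2)
      (fun h1 h2 => lt_trans h1 h2) _ (List.ne_nil_of_mem hMF)
  have hvM : v = pvName lB := by
    have hvF : v ∈ (table.map pvName).filter
        (fun name => PySem.Str.len name == PySem.Str.len (pvName lB)) := by
      rw [hF]; exact List.mem_append_right _ (List.mem_cons_self ..)
    obtain ⟨hvn, hvl⟩ := List.mem_filter.1 hvF
    obtain ⟨l, hl, rfl⟩ := List.mem_map.1 hvn
    have hle : pvName l ≤ pvName lB := hname_le l hl (by simpa using hvl)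
    rw [hF] at hMF
    rcases List.mem_append.1 hMF with hM | hM
    · exact absurd (hasv _ hM) (not_lt.2 hle)
    · rcases List.mem_cons.1 hM with h | hM
      · exact h.symm
      · exact le_antisymm hle (not_lt.1 (hbsv _ hM))
  rw [hV]
  show (table.findSome? (fun line =>
      if pvName line == v then some ((PySem.List.pyGet? line 0).getD "") else none)).getD ""
      = get_longest_name_id_alt table
  rw [hvM, hBval]
  conv_lhs => rw [htab]
  rw [pvFindSome_skip _ as lB bs (by
    intro a ha
    have hne' : pvName a ≠ pvName lB := by
      intro h
      have hk : pvKey a = pvKey lB := by rw [pvKey, pvKey, h]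
      exact absurd (has a ha) (by rw [hk]; exact lt_irrefl _)
    simp [hne'])]
  simp
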